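-- pv_equiv track=rewrite | github.com/svercillo/LeetcodeAlgorithms | hard/best-time-to-buy-and-sell-stock-iii.py | get_sunruns
-- ===== SOURCE A (Python) =====
-- import math
--
-- def get_sunruns(prices):
--     localmax = math.inf
--     localmin = math.inf
--
--     sunruns = []
--     for p in prices:
--         if p < localmax:
--             if localmin < math.inf and localmin < localmax:
--                 sunruns.append((localmin, localmax))
--             localmin = p
--             localmax = p
--         else:
--             localmax = p
--
--     if localmin < math.inf and localmin < localmax:
--         sunruns.append((localmin, localmax))
--
--     return sunruns
-- ===== SOURCE B (Python) =====
-- def get_sunruns(prices):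
--     n = len(prices)
--     i = 0
--     res = []
--     while i < n:
--         while i + 1 < n and prices[i + 1] <= prices[i]:
--             i += 1
--         valley = prices[i]
--         while i + 1 < n and prices[i + 1] >= prices[i]:
--             i += 1
--         peak = prices[i]
--         if valley < peak:
--             res.append((valley, peak))
--         i += 1
--     return res
-- ===== Notes on version B (the rewrite author's own statement) =====
-- stated objective: alternative
-- what changed: Replaces A's single accumulator fold tracking localmin/localmax Option-style state with the classic peak-valley scan: two inner index loops find each valley and peak directly, appending (valley, peak) when strictly increasing.
import Mathlib
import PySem

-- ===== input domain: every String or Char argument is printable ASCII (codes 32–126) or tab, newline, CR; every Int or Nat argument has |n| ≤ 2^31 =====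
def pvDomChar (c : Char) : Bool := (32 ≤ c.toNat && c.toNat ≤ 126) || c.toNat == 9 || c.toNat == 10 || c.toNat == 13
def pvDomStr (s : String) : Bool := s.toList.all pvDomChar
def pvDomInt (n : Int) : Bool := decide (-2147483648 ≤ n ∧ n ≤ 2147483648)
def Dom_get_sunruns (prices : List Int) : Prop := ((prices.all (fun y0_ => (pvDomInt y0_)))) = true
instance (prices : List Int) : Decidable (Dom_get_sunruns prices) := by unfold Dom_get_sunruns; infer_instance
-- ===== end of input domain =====

-- B replaces A's one-pass min/max-accumulator fold by the classic peak-valley scan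
-- (two inner index loops per run); same O(n) cost, different decomposition.

-- ===== PORT A =====
-- 'none' plays the role of math.inf (only value ever compared against it in A)
def pvLtO (p : Int) (o : Option Int) : Bool :=
  match o with
  | none => true
  | some v => decide (p < v)

-- Python's 'localmin < math.inf and localmin < localmax'
def pvLtOO (a b : Option Int) : Bool :=
  match a, b with
  | none, _ => false
  | some _, none => true
  | some x, some y => decide (x < y)

-- (lmin.getD 0, lmax.getD 0): whenever the flush condition pvLtOO holds both are 'some'
def pvStepA (st : Option Int × Option Int × List (Int × Int)) (p : Int) :
    Option Int × Option Int × List (Int × Int) :=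
  match st with
  | (lmax, lmin, s) =>
    if pvLtO p lmax then
      (some p, some p, if pvLtOO lmin lmax then s ++ [(lmin.getD 0, lmax.getD 0)] else s)
    else (some p, lmin, s)

def get_sunruns (prices : List Int) : List (Int × Int) :=
  match prices.foldl pvStepA ((none : Option Int), (none : Option Int), ([] : List (Int × Int))) with
  | (lmax, lmin, s) => if pvLtOO lmin lmax then s ++ [(lmin.getD 0, lmax.getD 0)] else s

-- ===== PORT B =====
-- inner while: advance past descending/flat steps (valley search)
def pvDesc (l : List Int) (i : Nat) : Nat :=
  if h : i + 1 < l.length ∧ l.getD (i+1) 0 ≤ l.getD i 0 then pvDesc l (i+1) else i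
termination_by l.length - i
decreasing_by omega

-- inner while: advance past ascending/flat steps (peak search)
def pvAsc (l : List Int) (i : Nat) : Nat :=
  if h : i + 1 < l.length ∧ l.getD i 0 ≤ l.getD (i+1) 0 then pvAsc l (i+1) else i
termination_by l.length - i
decreasing_by omega

theorem pvDesc_ge (l : List Int) (i : Nat) : i ≤ pvDesc l i := by
  unfold pvDesc
  split
  · exact le_trans (Nat.le_succ i) (pvDesc_ge l (i+1))
  · exact le_refl i
termination_by l.length - i
decreasing_by rename_i h; omega

theorem pvAsc_ge (l : List Int) (i : Nat) : i ≤ pvAsc l i := by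
  unfold pvAsc
  split
  · exact le_trans (Nat.le_succ i) (pvAsc_ge l (i+1))
  · exact le_refl i
termination_by l.length - i
decreasing_by rename_i h; omega

-- outer while loop of B
def pvOuter (l : List Int) (i : Nat) : List (Int × Int) :=
  if h : i < l.length then
    let j := pvDesc l i
    let valley := l.getD j 0
    let k := pvAsc l j
    let peak := l.getD k 0
    let rest := pvOuter l (k+1)
    if valley < peak then (valley, peak) :: rest else rest
  else []
termination_by l.length - i
decreasing_by
  have h1 := pvDesc_ge l i
  have h2 := pvAsc_ge l (pvDesc l i)
  omega

def get_sunruns_alt (prices : List Int) : List (Int × Int) := pvOuter prices 0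

-- ===== PRECONDITION & SPEC =====
def Spec_get_sunruns (prices : List Int) (out : List (Int × Int)) : Prop := out = get_sunruns_alt prices
instance (prices : List Int) (out : List (Int × Int)) : Decidable (Spec_get_sunruns prices out) := by unfold Spec_get_sunruns; infer_instance

-- ===== CLAIM (what is proved, stated in full; the proofs are below) =====
def Claim_equal_get_sunruns : Prop := ∀ (prices : List Int), Dom_get_sunruns prices → Spec_get_sunruns prices (get_sunruns prices)

-- ===== LEMMAS AND PROOFS =====

-- structural reference semantics: maximal non-decreasing runs, emit (first, last) when strict rise
def sdesc : Int → List Int → Int × List Int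
  | v, [] => (v, [])
  | v, h :: t => if h ≤ v then sdesc h t else (v, h :: t)

def sasc : Int → List Int → Int × List Int
  | v, [] => (v, [])
  | v, h :: t => if v ≤ h then sasc h t else (v, h :: t)

theorem sdesc_len (v : Int) (t : List Int) : (sdesc v t).2.length ≤ t.length := by
  induction t generalizing v with
  | nil => simp [sdesc]
  | cons h t ih =>
    simp only [sdesc]
    split
    · exact le_trans (ih h) (Nat.le_succ _)
    · simp

theorem sasc_len (v : Int) (t : List Int) : (sasc v t).2.length ≤ t.length := by
  induction t generalizing v with
  | nil => simp [sasc]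
  | cons h t ih =>
    simp only [sasc]
    split
    · exact le_trans (ih h) (Nat.le_succ _)
    · simp

def srun : List Int → List (Int × Int)
  | [] => []
  | h :: t =>
    let d := sdesc h t
    let a := sasc d.1 d.2
    (if d.1 < a.1 then [(d.1, a.1)] else []) ++ srun a.2
termination_by l => l.length
decreasing_by
  have h1 := sdesc_len h t
  have h2 := sasc_len (sdesc h t).1 (sdesc h t).2
  simp only [List.length_cons]
  omega

def srunAux (v : Int) (t : List Int) : List (Int × Int) :=
  let d := sdesc v t
  let a := sasc d.1 d.2
  (if d.1 < a.1 then [(d.1, a.1)] else []) ++ srun a.2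

def ascP (m M : Int) (l : List Int) : List (Int × Int) :=
  let a := sasc M l
  (if m < a.1 then [(m, a.1)] else []) ++ srun a.2

theorem srun_cons (h : Int) (t : List Int) : srun (h :: t) = srunAux h t := by
  simp [srun, srunAux]

theorem srunAux_eq_ascP (t : List Int) : ∀ v : Int, srunAux v t = ascP v v t := by
  induction t with
  | nil => intro v; simp [srunAux, ascP, sdesc, sasc]
  | cons q t' ih =>
    intro v
    by_cases hq : q ≤ v
    · -- descent consumes q
      have hd : sdesc v (q :: t') = sdesc q t' := by simp [sdesc, hq]
      by_cases hv : v ≤ q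
      · -- q = v : ascent also consumes q
        have hvq : v = q := le_antisymm hv hq
        subst hvq
        have ha : sasc v (v :: t') = sasc v t' := by simp [sasc]
        have h1 : srunAux v (v :: t') = srunAux v t' := by simp [srunAux, hd]
        rw [h1, ih v]
        simp [ascP, ha]
      · -- q < v : ascent stops, peak = v, no emit, rest = q :: t'
        have ha : sasc v (q :: t') = (v, q :: t') := by simp [sasc, hv]
        have h1 : srunAux v (q :: t') = srunAux q t' := by simp [srunAux, hd]
        have h2 : ascP v v (q :: t') = srun (q :: t') := by simp [ascP, ha]
        rw [h1, h2, srun_cons]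
    · -- q > v : descent stops at valley v; ascent continues past q
      have hd : sdesc v (q :: t') = (v, q :: t') := by simp [sdesc, hq]
      have hv : v ≤ q := le_of_lt (lt_of_not_ge hq)
      have ha : sasc v (q :: t') = sasc q t' := by simp [sasc, hv]
      simp [srunAux, ascP, hd, ha]

-- finalization of A's fold state
def pvFin (st : Option Int × Option Int × List (Int × Int)) : List (Int × Int) :=
  match st with
  | (lmax, lmin, s) => if pvLtOO lmin lmax then s ++ [(lmin.getD 0, lmax.getD 0)] else s

theorem foldA_char (l : List Int) :
    ∀ (M m : Int) (acc : List (Int × Int)), m ≤ M →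
      pvFin (l.foldl pvStepA (some M, some m, acc)) = acc ++ ascP m M l := by
  induction l with
  | nil =>
    intro M m acc _
    simp only [List.foldl_nil, pvFin, pvLtOO, ascP, sasc, srun]
    by_cases h : m < M <;> simp [h]
  | cons h t ih =>
    intro M m acc hmM
    by_cases hc : h < M
    · -- reset branch: flush if m < M, restart run at h
      have hstep : pvStepA (some M, some m, acc) h =
          (some h, some h, if (m : Int) < M then acc ++ [(m, M)] else acc) := by
        simp [pvStepA, pvLtO, pvLtOO, hc]
      rw [List.foldl_cons, hstep, ih h h _ (le_refl h)]
      have hsr : ascP h h t = srun (h :: t) := by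
        rw [srun_cons, srunAux_eq_ascP]
      have hA : ascP m M (h :: t) =
          (if (m : Int) < M then [(m, M)] else []) ++ srun (h :: t) := by
        have : sasc M (h :: t) = (M, h :: t) := by
          simp [sasc, not_le.mpr hc]
        simp [ascP, this]
      rw [hA, hsr]
      by_cases hm : (m : Int) < M <;> simp [hm]
    · -- continue branch: extend run, new max h
      have hMh : M ≤ h := le_of_not_gt hc
      have hstep : pvStepA (some M, some m, acc) h = (some h, some m, acc) := by
        simp [pvStepA, pvLtO, hc]
      rw [List.foldl_cons, hstep, ih h m acc (le_trans hmM hMh)]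
      have : ascP m M (h :: t) = ascP m h t := by
        simp [ascP, sasc, hMh]
      rw [this]

theorem getA_eq_srun (prices : List Int) : get_sunruns prices = srun prices := by
  cases prices with
  | nil => simp [get_sunruns, srun, pvLtOO]
  | cons h t =>
    have hstep : pvStepA ((none : Option Int), (none : Option Int), ([] : List (Int × Int))) h =
        (some h, some h, []) := by
      simp [pvStepA, pvLtO, pvLtOO]
    have : get_sunruns (h :: t) = pvFin ((h :: t).foldl pvStepA (none, none, [])) := rfl
    rw [this, List.foldl_cons, hstep, foldA_char t h h [] (le_refl h)]
    rw [srun_cons, srunAux_eq_ascP]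
    simp

-- bridge: index loops over l correspond to sdesc/sasc on drops

theorem pvDropCons (l : List Int) (i : Nat) (h : i < l.length) :
    l.drop i = l.getD i 0 :: l.drop (i+1) := by
  rw [List.drop_eq_getElem_cons h]
  congr 1
  exact (List.getD_eq_getElem l 0 h).symm

theorem pvDesc_bridge (l : List Int) : ∀ i : Nat, i < l.length →
    (l.getD (pvDesc l i) 0, l.drop (pvDesc l i + 1)) = sdesc (l.getD i 0) (l.drop (i+1)) := by
  intro i hi
  rw [pvDesc]
  split
  · rename_i h
    rw [pvDropCons l (i+1) h.1]
    rw [show sdesc (l.getD i 0) (l.getD (i+1) 0 :: l.drop (i+2)) =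
        sdesc (l.getD (i+1) 0) (l.drop (i+2)) from by
      simp only [sdesc]; rw [if_pos h.2]]
    exact pvDesc_bridge l (i+1) h.1
  · rename_i h
    by_cases hb : i + 1 < l.length
    · have hle : ¬ l.getD (i+1) 0 ≤ l.getD i 0 := fun hc => h ⟨hb, hc⟩
      rw [pvDropCons l (i+1) hb]
      simp only [sdesc]
      rw [if_neg hle, ← pvDropCons l (i+1) hb]
    · rw [List.drop_eq_nil_of_le (show l.length ≤ i + 1 by omega)]
      simp [sdesc]
termination_by i => l.length - i
decreasing_by rename_i h; omega

theorem pvAsc_bridge (l : List Int) : ∀ i : Nat, i < l.length →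
    (l.getD (pvAsc l i) 0, l.drop (pvAsc l i + 1)) = sasc (l.getD i 0) (l.drop (i+1)) := by
  intro i hi
  rw [pvAsc]
  split
  · rename_i h
    rw [pvDropCons l (i+1) h.1]
    rw [show sasc (l.getD i 0) (l.getD (i+1) 0 :: l.drop (i+2)) =
        sasc (l.getD (i+1) 0) (l.drop (i+2)) from by
      simp only [sasc]; rw [if_pos h.2]]
    exact pvAsc_bridge l (i+1) h.1
  · rename_i h
    by_cases hb : i + 1 < l.length
    · have hle : ¬ l.getD i 0 ≤ l.getD (i+1) 0 := fun hc => h ⟨hb, hc⟩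
      rw [pvDropCons l (i+1) hb]
      simp only [sasc]
      rw [if_neg hle, ← pvDropCons l (i+1) hb]
    · rw [List.drop_eq_nil_of_le (show l.length ≤ i + 1 by omega)]
      simp [sasc]
termination_by i => l.length - i
decreasing_by rename_i h; omega

theorem pvDesc_lt (l : List Int) : ∀ i : Nat, i < l.length → pvDesc l i < l.length := by
  intro i hi
  rw [pvDesc]
  split
  · rename_i h; exact pvDesc_lt l (i+1) h.1
  · exact hi
termination_by i => l.length - i
decreasing_by rename_i h; omega

theorem pvAsc_lt (l : List Int) : ∀ i : Nat, i < l.length → pvAsc l i < l.length := by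
  intro i hi
  rw [pvAsc]
  split
  · rename_i h; exact pvAsc_lt l (i+1) h.1
  · exact hi
termination_by i => l.length - i
decreasing_by rename_i h; omega

theorem pvOuter_eq_srun (l : List Int) : ∀ i : Nat, pvOuter l i = srun (l.drop i) := by
  intro i
  rw [pvOuter]
  split
  · rename_i hi
    rw [pvDropCons l i hi, srun_cons]
    have hj := pvDesc_bridge l i hi
    have hjlt := pvDesc_lt l i hi
    have hk := pvAsc_bridge l (pvDesc l i) hjlt
    have hklt := pvAsc_lt l (pvDesc l i) hjlt
    have hrec : pvOuter l (pvAsc l (pvDesc l i) + 1) = srun (l.drop (pvAsc l (pvDesc l i) + 1)) := by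
      exact pvOuter_eq_srun l (pvAsc l (pvDesc l i) + 1)
    simp only [srunAux, ← hj, ← hk, hrec]
    split <;> simp
  · rename_i hi
    have : l.drop i = [] := List.drop_eq_nil_of_le (by omega)
    rw [this, srun]
termination_by i => l.length - i
decreasing_by
  have h1 := pvDesc_ge l i
  have h2 := pvAsc_ge l (pvDesc l i)
  omega

-- ===== VERDICT (by name: the statement is the Claim_ definition above) =====
theorem get_sunruns_spec : Claim_equal_get_sunruns := by
  intro prices _
  unfold Spec_get_sunruns get_sunruns_alt
  rw [getA_eq_srun, pvOuter_eq_srun]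
  simp
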